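-- pv_equiv track=rewrite | github.com/txmboslxce-ai/fantrax-league-manager | fantrax.py | get_current_round
-- ===== SOURCE A (Python) =====
-- def get_current_round(cup_config):
--     rounds = ["playoff", "round_of_16", "quarter_final", "semi_final", "final"]
--     current = "groups"
--     for round_name in rounds:
--         matches = cup_config.get(round_name, {}).get("matches", [])
--         if matches:
--             current = round_name
--             if any(m["winner"] is None for m in matches):
--                 break
--     return current
-- ===== SOURCE B (Python) =====
-- def get_current_round(cup_config):
--     rounds = ["playoff", "round_of_16", "quarter_final", "semi_final", "final"]
--     played = [r for r in rounds
--               if cup_config.get(r, {}).get("matches", [])]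
--     pending = [r for r in played
--                if any(m["winner"] is None
--                       for m in cup_config.get(r, {}).get("matches", []))]
--     if pending:
--         return pending[0]
--     if played:
--         return played[-1]
--     return "groups"
-- ===== Notes on version B (the rewrite author's own statement) =====
-- stated objective: simpler
-- what changed: Replaces the stateful loop with early break by two declarative comprehensions (played rounds, rounds with a pending match) and a final three-way selection: first pending round, else last played round, else 'groups'.
-- outside the precondition, e.g. on get_current_round({'playoff': {'matches': [{'winner': None}, {}]}}): A returns 'playoff', B returns 'playoff'
import Mathlib
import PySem

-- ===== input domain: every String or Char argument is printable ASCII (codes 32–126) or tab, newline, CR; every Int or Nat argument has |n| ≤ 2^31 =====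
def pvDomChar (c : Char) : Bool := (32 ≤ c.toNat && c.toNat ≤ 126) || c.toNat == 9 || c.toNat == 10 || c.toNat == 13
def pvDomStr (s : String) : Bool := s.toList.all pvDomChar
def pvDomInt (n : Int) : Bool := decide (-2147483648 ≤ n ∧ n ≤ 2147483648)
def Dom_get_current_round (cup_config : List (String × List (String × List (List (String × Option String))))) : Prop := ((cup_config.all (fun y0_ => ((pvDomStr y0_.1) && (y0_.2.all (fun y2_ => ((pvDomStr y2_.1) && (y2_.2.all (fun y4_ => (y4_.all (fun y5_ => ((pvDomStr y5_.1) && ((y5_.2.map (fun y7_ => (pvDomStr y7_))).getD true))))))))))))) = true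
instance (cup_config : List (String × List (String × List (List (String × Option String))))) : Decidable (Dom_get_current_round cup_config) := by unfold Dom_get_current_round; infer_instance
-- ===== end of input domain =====

-- B replaces A's stateful loop-with-break by two comprehensions (played / pending rounds)
-- and a final selection; same O(n) cost, chosen for clarity ("simpler").


-- shared primitive-level helpers (both Pythons contain these very subexpressions)
-- cup_config.get(r, {}).get("matches", [])
def pvMatchesOf (cup_config : List (String × List (String × List (List (String × Option String))))) (r : String) : List (List (String × Option String)) :=
  PySem.Dict.getD (PySem.Dict.mk ((PySem.Dict.mk cup_config).getD r [])) "matches" []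

-- any(m["winner"] is None for m in ms)   (missing "winner" ⇒ false here; Python raises — excluded by Pre_)
def pvAnyPending (ms : List (List (String × Option String))) : Bool :=
  ms.any (fun m => PySem.Dict.get? (PySem.Dict.mk m) "winner" == some none)

-- ===== PORT A =====
def pvGoA (cup_config : List (String × List (String × List (List (String × Option String))))) : List String → String → String
  | [], current => current
  | r :: rest, current =>
      let ms := pvMatchesOf cup_config r
      if !ms.isEmpty then
        if pvAnyPending ms then r else pvGoA cup_config rest r
      else pvGoA cup_config rest current

def get_current_round (cup_config : List (String × List (String × List (List (String × Option String))))) : String :=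
  pvGoA cup_config ["playoff", "round_of_16", "quarter_final", "semi_final", "final"] "groups"

-- ===== PORT B =====
def get_current_round_alt (cup_config : List (String × List (String × List (List (String × Option String))))) : String :=
  let rounds := ["playoff", "round_of_16", "quarter_final", "semi_final", "final"]
  let played := rounds.filter (fun r => !(pvMatchesOf cup_config r).isEmpty)
  let pending := played.filter (fun r => pvAnyPending (pvMatchesOf cup_config r))
  match pending.head? with
  | some p => p
  | none =>
    match played.getLast? with
    | some l => l
    | none => "groups"

-- ===== PRECONDITION & SPEC =====
-- Pre_ requires every match dict of the five named rounds to carry a "winner" key.  On malformed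
-- matches Python A raises KeyError unless A's early break / any()'s short-circuit skips them, so on
-- some excluded inputs A still returns while B raises (or both return): that outcome is an artefact
-- of how far each scan got, and Pre_ excludes all such inputs (see claim cites).
def Pre_get_current_round (cup_config : List (String × List (String × List (List (String × Option String))))) : Prop :=
  (["playoff", "round_of_16", "quarter_final", "semi_final", "final"].all (fun r =>
    (pvMatchesOf cup_config r).all (fun m =>
      (PySem.Dict.get? (PySem.Dict.mk m) "winner").isSome))) = true
instance (cup_config : List (String × List (String × List (List (String × Option String))))) : Decidable (Pre_get_current_round cup_config) := by unfold Pre_get_current_round; infer_instance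

def pvWitness_get_current_round : (List (String × List (String × List (List (String × Option String))))) :=
  [("playoff", [("matches", [[("winner", some "A")], [("winner", none)]])]),
   ("round_of_16", [("matches", [])])]

def Spec_get_current_round (cup_config : List (String × List (String × List (List (String × Option String))))) (out : String) : Prop := out = get_current_round_alt cup_config
instance (cup_config : List (String × List (String × List (List (String × Option String))))) (out : String) : Decidable (Spec_get_current_round cup_config out) := by unfold Spec_get_current_round; infer_instance

-- ===== CLAIM (what is proved, stated in full; the proofs are below) =====
def Claim_equal_get_current_round : Prop := ∀ (cup_config : List (String × List (String × List (List (String × Option String))))), Dom_get_current_round cup_config → Pre_get_current_round cup_config → Spec_get_current_round cup_config (get_current_round cup_config)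

-- ===== LEMMAS AND PROOFS =====

lemma getLast?_cons_getD {α : Type} (l : List α) (a c : α) :
    ((a :: l).getLast?).getD c = (l.getLast?).getD a := by
  simp [List.getLast?_cons]

lemma pvGoA_eq (cfg : List (String × List (String × List (List (String × Option String)))))
    (rs : List String) (cur : String) :
    pvGoA cfg rs cur =
      (match ((rs.filter (fun r => !(pvMatchesOf cfg r).isEmpty)).filter
                (fun r => pvAnyPending (pvMatchesOf cfg r))).head? with
       | some p => p
       | none => ((rs.filter (fun r => !(pvMatchesOf cfg r).isEmpty)).getLast?).getD cur) := by
  induction rs generalizing cur with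
  | nil => rfl
  | cons r rest ih =>
      by_cases hP : (pvMatchesOf cfg r).isEmpty
      · simp [pvGoA, hP, ih cur]
      · by_cases hQ : pvAnyPending (pvMatchesOf cfg r)
        · simp [pvGoA, hP, hQ]
        · simp only [pvGoA, hP, hQ, Bool.not_false, if_true, if_false, Bool.false_eq_true,
            List.filter_cons]
          rw [ih r]
          simp [getLast?_cons_getD]

-- ===== VERDICT (by name: the statement is the Claim_ definition above) =====
theorem get_current_round_spec : Claim_equal_get_current_round := by
  intro cfg _ _
  show get_current_round cfg = get_current_round_alt cfg
  rw [get_current_round, get_current_round_alt, pvGoA_eq]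
  cases ((["playoff", "round_of_16", "quarter_final", "semi_final", "final"].filter
      (fun r => !(pvMatchesOf cfg r).isEmpty)).filter
        (fun r => pvAnyPending (pvMatchesOf cfg r))).head? with
  | some p => simp
  | none =>
      cases (["playoff", "round_of_16", "quarter_final", "semi_final", "final"].filter
          (fun r => !(pvMatchesOf cfg r).isEmpty)).getLast? <;> simp
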